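-- pv_equiv track=rewrite | github.com/AmadoMiguel/Coding-problems | lowestIntInArray.py | findLowIntArr
-- ===== SOURCE A (Python) =====
-- def findLowIntArr(arr):
--     # Store only positive integers in new array
--     posInts = [i for i in arr if i >= 0]
--     # All numbers are negative
--     if len(posInts) == 0:
--         lowInt = 1
--     else:
--         # Sort integer numbers in array
--         posInts = sorted(posInts)
--         # Index variable
--         ind = 0
--         for p in posInts:
--             # lowInt is the nest integer after the largest
--             # int in the array.
--             if ind == len(posInts)-1:
--                 lowInt = p + 1
--                 break
--             # lowInt is the smallest integer not in array
--             elif p + 1 < posInts[ind + 1]: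
--                 lowInt =  p + 1
--                 break
--             # Keep going inside array
--             else:
--                 ind += 1
--     return lowInt
-- ===== SOURCE B (Python) =====
-- def findLowIntArr(arr):
--     # Probe consecutive candidates upward from the smallest non-negative value.
--     s = {i for i in arr if i >= 0}
--     if not s:
--         return 1
--     c = min(s)
--     while c in s:
--         c += 1
--     return c
-- ===== Notes on version B (the rewrite author's own statement) =====
-- stated objective: alternative
-- what changed: Replaces sort-then-scan-for-a-gap (sorted list plus index bookkeeping) with a hash set and an upward integer probe from the minimum present value.
import Mathlib
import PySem

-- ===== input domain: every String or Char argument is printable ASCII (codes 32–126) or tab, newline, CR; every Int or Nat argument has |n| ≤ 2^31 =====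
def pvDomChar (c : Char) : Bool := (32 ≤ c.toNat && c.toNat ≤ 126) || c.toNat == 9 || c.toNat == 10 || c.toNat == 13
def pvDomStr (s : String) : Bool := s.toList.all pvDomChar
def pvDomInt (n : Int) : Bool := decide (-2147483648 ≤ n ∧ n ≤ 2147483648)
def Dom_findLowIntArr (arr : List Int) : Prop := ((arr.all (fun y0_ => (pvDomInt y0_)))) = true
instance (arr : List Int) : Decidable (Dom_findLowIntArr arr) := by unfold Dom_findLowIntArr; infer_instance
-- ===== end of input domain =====

-- B replaces A's sort-then-scan-for-a-gap with a set and an upward probe from the minimum (alternative decomposition).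

-- ===== PORT A =====
-- the 'for p in posInts' loop with its running index 'ind'; the [] case is unreachable
-- (the loop always breaks at ind = len-1 at the latest), 0 is a dummy value there.
-- posInts[ind+1] is a non-negative in-range index whenever read, so getD is exact there.
def findLowAux (ps : List Int) : List Int → Nat → Int
  | [], _ => 0
  | p :: rest, ind =>
    if ind = ps.length - 1 then p + 1
    else if p + 1 < ps.getD (ind + 1) 0 then p + 1
    else findLowAux ps rest (ind + 1)

def findLowIntArr (arr : List Int) : Int :=
  let posInts := arr.filter (fun i => decide (0 ≤ i))
  if posInts.length = 0 then 1
  else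
    let ps := PySem.List.sorted posInts (fun x => x) false
    findLowAux ps ps 0

-- ===== PORT B =====
-- the 'while c in s: c += 1' loop; fuel s.length always suffices: the probed values that
-- hit s are distinct consecutive members of the duplicate-free set s.
def probeUp (s : List Int) : Int → Nat → Int
  | c, 0 => c
  | c, fuel + 1 => if PySem.Set.contains s c then probeUp s (c + 1) fuel else c

def findLowIntArr_alt (arr : List Int) : Int :=
  let s := PySem.Set.ofList (arr.filter (fun i => decide (0 ≤ i)))
  match PySem.List.min? s (fun x => x) with
  | none => 1
  | some m => probeUp s m s.length

-- ===== PRECONDITION & SPEC =====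
def Spec_findLowIntArr (arr : List Int) (out : Int) : Prop := out = findLowIntArr_alt arr
instance (arr : List Int) (out : Int) : Decidable (Spec_findLowIntArr arr out) := by unfold Spec_findLowIntArr; infer_instance

-- ===== CLAIM (what is proved, stated in full; the proofs are below) =====
def Claim_equal_findLowIntArr : Prop := ∀ (arr : List Int), Dom_findLowIntArr arr → Spec_findLowIntArr arr (findLowIntArr arr)

-- ===== LEMMAS AND PROOFS =====

-- B's while loop returns r when r is the first value ≥ c outside s and the fuel covers the distance.
lemma probeUp_eq (s : List Int) (r : Int) (hr : r ∉ s) :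
    ∀ (fuel : Nat) (c : Int), c ≤ r → (∀ k : Int, c ≤ k → k < r → k ∈ s) →
    (r - c).toNat ≤ fuel → probeUp s c fuel = r := by
  intro fuel
  induction fuel with
  | zero =>
    intro c hc _ hf
    have : c = r := by omega
    simpa [probeUp] using this
  | succ n ih =>
    intro c hc hall hf
    by_cases hm : c ∈ s
    · have hcr : c ≠ r := fun h => hr (h ▸ hm)
      have step : probeUp s c (n+1) = probeUp s (c+1) n := by simp [probeUp, hm]
      rw [step]
      exact ih (c+1) (by omega) (fun k h1 h2 => hall k (by omega) h2) (by omega)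
    · have hcr : c = r := by
        rcases lt_or_eq_of_le hc with h | h
        · exact absurd (hall c le_rfl h) hm
        · exact h
      subst hcr
      simp [probeUp]
      exact fun h => absurd h hm

-- A's loop on a ≤-sorted list ps: provided every value in [ps[0], ps[ind]] is present, the
-- result r is absent from ps, every value in [ps[0], r) is present, and ps[0] < r.
lemma findLowAux_spec (ps : List Int) (hps : ps.Pairwise (· ≤ ·)) :
    ∀ (rest : List Int), ∀ (ind : Nat), ps.drop ind = rest → rest ≠ [] →
    (∀ k : Int, ps.getD 0 0 ≤ k → k ≤ ps.getD ind 0 → k ∈ ps) →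
    findLowAux ps rest ind ∉ ps ∧
      (∀ k : Int, ps.getD 0 0 ≤ k → k < findLowAux ps rest ind → k ∈ ps) ∧
      ps.getD 0 0 < findLowAux ps rest ind := by
  have hmono : ∀ i j (hi : i < ps.length) (hj : j < ps.length), i ≤ j → ps[i] ≤ ps[j] := by
    intro i j hi hj hij
    rcases lt_or_eq_of_le hij with h | h
    · exact (List.pairwise_iff_getElem.mp hps) i j hi hj h
    · subst h; exact le_rfl
  intro rest
  induction rest generalizing ps with
  | nil => intro ind _ hne _; exact absurd rfl hne
  | cons p rest' ih =>
    intro ind hdrop _ hinv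
    have hlen : ps.length - ind = rest'.length + 1 := by
      have := congrArg List.length hdrop
      simpa using this
    have hlt : ind < ps.length := by omega
    have hp : ps[ind] = p := by
      have h0 : (ps.drop ind)[0]'(by rw [hdrop]; simp) = p := by simp [hdrop]
      simpa using h0
    have hpdG : ps.getD ind 0 = p := by rw [List.getD_eq_getElem ps 0 hlt, hp]
    have h00 : 0 < ps.length := by omega
    have h0elem : ps.getD 0 0 = ps[0] := List.getD_eq_getElem ps 0 h00
    have h0le : ps.getD 0 0 ≤ p := by
      rw [h0elem, ← hp]; exact hmono 0 ind h00 hlt (Nat.zero_le _)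
    simp only [findLowAux]
    split_ifs with hlast hgap
    · -- last element: result p + 1
      refine ⟨?_, ?_, by omega⟩
      · intro hmem
        obtain ⟨j, hj, hje⟩ := List.mem_iff_getElem.mp hmem
        have hji : j ≤ ind := by omega
        have := hmono j ind hj hlt hji
        rw [hje, hp] at this; omega
      · intro k hk1 hk2
        exact hinv k hk1 (by rw [hpdG]; omega)
    · -- gap before ps[ind+1]: result p + 1
      have hind1 : ind + 1 < ps.length := by omega
      have hq : ps.getD (ind+1) 0 = ps[ind+1] := List.getD_eq_getElem ps 0 hind1
      refine ⟨?_, ?_, by omega⟩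
      · intro hmem
        obtain ⟨j, hj, hje⟩ := List.mem_iff_getElem.mp hmem
        by_cases hji : j ≤ ind
        · have := hmono j ind hj hlt hji
          rw [hje, hp] at this; omega
        · have := hmono (ind+1) j hind1 hj (by omega)
          rw [hje] at this
          rw [hq] at hgap; omega
      · intro k hk1 hk2
        exact hinv k hk1 (by rw [hpdG]; omega)
    · -- no gap yet: step to ind + 1
      have hrest' : rest' ≠ [] := by
        intro h; subst h
        simp at hlen
        omega
      have hdrop' : ps.drop (ind+1) = rest' := by
        have h := congrArg List.tail hdrop
        simpa [List.tail_drop] using h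
      have hind1 : ind + 1 < ps.length := by omega
      have hq : ps.getD (ind+1) 0 = ps[ind+1] := List.getD_eq_getElem ps 0 hind1
      have hpq : p ≤ ps.getD (ind+1) 0 := by
        rw [hq, ← hp]; exact hmono ind (ind+1) hlt hind1 (by omega)
      have hinv' : ∀ k : Int, ps.getD 0 0 ≤ k → k ≤ ps.getD (ind+1) 0 → k ∈ ps := by
        intro k hk1 hk2
        by_cases h : k ≤ p
        · exact hinv k hk1 (by rw [hpdG]; omega)
        · have hk : k = ps.getD (ind+1) 0 := by omega
          rw [hk, hq]
          exact List.getElem_mem hind1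
      exact ih ps hps hmono (ind+1) hdrop' hrest' hinv'

theorem findLowIntArr_spec : Claim_equal_findLowIntArr := by
  intro arr _
  unfold Spec_findLowIntArr findLowIntArr findLowIntArr_alt
  simp only []
  by_cases hemp : arr.filter (fun i => decide (0 ≤ i)) = []
  · rw [hemp]; rfl
  · set posInts := arr.filter (fun i => decide (0 ≤ i)) with hposdef
    set ps := PySem.List.sorted posInts (fun x => x) false with hpsdef
    set s := PySem.Set.ofList posInts with hsdef
    have hmemps : ∀ x : Int, x ∈ ps ↔ x ∈ posInts := fun x => PySem.List.mem_sorted posInts (fun x => x) false x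
    have hmems : ∀ x : Int, x ∈ s ↔ x ∈ posInts := fun x => PySem.Set.mem_ofList posInts x
    have hpsne : ps ≠ [] := by
      rw [hpsdef, Ne, PySem.List.sorted_eq_nil_iff]; exact hemp
    obtain ⟨x0, hx0⟩ := List.exists_mem_of_ne_nil _ hemp
    have hsne : s ≠ [] := by
      intro h
      exact absurd ((hmems x0).mpr hx0) (by rw [h]; simp)
    cases hminc : PySem.List.min? s (fun x => x) with
    | none =>
        rw [PySem.List.min?_eq_none_iff] at hminc
        exact absurd hminc hsne
    | some m =>
      have hps : ps.Pairwise (· ≤ ·) := by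
        have := PySem.List.sorted_pairwise (xs := posInts) (key := fun x => x)
        simpa using this
    -- the head of ps is a member
      have h00 : 0 < ps.length := List.length_pos_iff.mpr hpsne
      have h0mem : ps.getD 0 0 ∈ ps := by
        rw [List.getD_eq_getElem ps 0 h00]; exact List.getElem_mem h00
      have hinv0 : ∀ k : Int, ps.getD 0 0 ≤ k → k ≤ ps.getD 0 0 → k ∈ ps := by
        intro k h1 h2
        have : k = ps.getD 0 0 := le_antisymm h2 h1
        rw [this]; exact h0mem
      obtain ⟨hA1, hA2, hA3⟩ :=
        findLowAux_spec ps hps ps 0 (by simp) hpsne hinv0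
      set r := findLowAux ps ps 0 with hrdef
      -- ps.getD 0 0 is the minimum value of s
      have hmmem : m ∈ s := PySem.List.min?_mem hminc
      have hmin : ∀ y ∈ s, m ≤ y := by
        have := PySem.List.min?_isMin hminc
        simpa using this
      have h0low : ∀ y ∈ ps, ps.getD 0 0 ≤ y := by
        cases hcps : ps with
        | nil => exact absurd hcps hpsne
        | cons x t =>
          intro y hy
          rcases List.mem_cons.mp hy with h | h
          · subst h; simp
          · have := (List.pairwise_cons.mp (hcps ▸ hps)).1 y h
            simpa using this
      have h0m : ps.getD 0 0 = m :=
        le_antisymm (h0low m ((hmemps m).mpr ((hmems m).mp hmmem)))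
          (hmin _ ((hmems _).mpr ((hmemps _).mp h0mem)))
      -- B's while loop reaches exactly r
      have hrnotin : r ∉ s := fun h => hA1 ((hmemps _).mpr ((hmems _).mp h))
      have hall : ∀ k : Int, m ≤ k → k < r → k ∈ s := fun k h1 h2 =>
        (hmems k).mpr ((hmemps k).mp (hA2 k (by rw [h0m]; exact h1) h2))
      have hsnodup : s.Nodup := hsdef ▸ PySem.Set.nodup_ofList posInts
      have hfuel : (r - m).toNat ≤ s.length := by
        set L := (List.range (r - m).toNat).map (fun k : Nat => m + (k : Int)) with hLdef
        have hLnd : L.Nodup :=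
          List.Nodup.map (fun a b hab => by exact_mod_cast add_left_cancel hab)
            (List.nodup_range)
        have hLsub : L ⊆ s := by
          intro x hx
          simp only [hLdef, List.mem_map, List.mem_range] at hx
          obtain ⟨k, hk, hkx⟩ := hx
          exact hall x (by omega) (by omega)
        have := (List.subperm_of_subset hLnd hLsub).length_le
        simpa [hLdef] using this
      have hB := probeUp_eq s r hrnotin s.length m (by omega) hall hfuel
      rw [if_neg (by simpa [List.length_eq_zero_iff] using hemp)]
      exact hB.symm
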